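-- pv_equiv track=rewrite | github.com/chiexplorer/TDANet | tests/useless.py | get_feat_len
-- ===== SOURCE A (Python) =====
-- def get_feat_len(feat_len, depth):
--     feat_len_tmp = feat_len
--     feat_lens = [feat_len]
--     for i in range(depth - 1):
--         feat_len_tmp = (feat_len_tmp + 1) // 2
--         feat_lens.append(feat_len_tmp)
--     feat_lens.reverse()  # 翻转
--     return feat_len_tmp
-- ===== SOURCE B (Python) =====
-- def get_feat_len(feat_len, depth):
--     k = depth - 1
--     if k <= 0:
--         return feat_len
--     k = min(k, max(1, abs(feat_len).bit_length()))  # beyond bit_length steps the value is a fixed point (0 or 1)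
--     return -((-feat_len) >> k)  # ceil division by 2**k
-- ===== Notes on version B (the rewrite author's own statement) =====
-- stated objective: faster
-- what changed: Replaces the depth-long loop of repeated ceil-halvings (and the built-then-discarded list) by a single closed-form ceiling division by 2^k, with k capped at feat_len's bit length since beyond it the value is a fixed point (0 or 1).
import Mathlib
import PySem

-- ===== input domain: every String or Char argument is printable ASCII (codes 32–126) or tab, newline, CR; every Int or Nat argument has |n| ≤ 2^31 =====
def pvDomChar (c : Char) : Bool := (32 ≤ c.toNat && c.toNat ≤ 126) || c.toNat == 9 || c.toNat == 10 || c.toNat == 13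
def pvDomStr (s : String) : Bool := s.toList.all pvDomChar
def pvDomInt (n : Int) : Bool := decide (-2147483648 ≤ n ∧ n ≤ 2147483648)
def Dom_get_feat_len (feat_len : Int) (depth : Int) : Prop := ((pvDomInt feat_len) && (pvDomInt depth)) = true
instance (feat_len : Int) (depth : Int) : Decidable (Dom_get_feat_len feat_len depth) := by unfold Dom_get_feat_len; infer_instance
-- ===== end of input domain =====

-- B replaces A's depth-long ceil-halving loop by one ceiling division by 2^k, with k capped at
-- the bit length of feat_len (past which the value is a fixed point): O(1) instead of O(depth).

-- ===== PORT A =====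
-- loop state: (feat_len_tmp, feat_lens); the reversed list is built and discarded, as in A
def get_feat_len (feat_len : Int) (depth : Int) : Int :=
  let st := (PySem.List.pyRange 0 (depth - 1) 1).foldl
    (fun (s : Int × List Int) _ =>
      let t := PySem.Int.floordiv (s.1 + 1) 2
      (t, s.2 ++ [t]))
    (feat_len, [feat_len])
  let _ := st.2.reverse
  st.1

-- ===== PORT B =====
def get_feat_len_alt (feat_len : Int) (depth : Int) : Int :=
  let k := depth - 1
  if k ≤ 0 then feat_len
  else
    let k2 := min k (max 1 (PySem.Int.bitLength feat_len : Int))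
    -- Python '>>' on ints is floor division by the power of two (exact)
    Neg.neg (PySem.Int.floordiv (-feat_len) (2 ^ k2.toNat))

-- ===== PRECONDITION & SPEC =====
def Spec_get_feat_len (feat_len : Int) (depth : Int) (out : Int) : Prop := out = get_feat_len_alt feat_len depth
instance (feat_len : Int) (depth : Int) (out : Int) : Decidable (Spec_get_feat_len feat_len depth out) := by unfold Spec_get_feat_len; infer_instance

-- ===== CLAIM (what is proved, stated in full; the proofs are below) =====
def Claim_equal_get_feat_len : Prop := ∀ (feat_len : Int) (depth : Int), Dom_get_feat_len feat_len depth → Spec_get_feat_len feat_len depth (get_feat_len feat_len depth)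

-- ===== LEMMAS AND PROOFS =====

-- ceil(x / 2^n), written exactly as B writes it
def ceilPow (n : Nat) (x : Int) : Int := -(PySem.Int.floordiv (-x) (2 ^ n))

theorem ceilPow_eq_iff (n : Nat) (x q : Int) :
    ceilPow n x = q ↔ (q - 1) * 2 ^ n < x ∧ x ≤ q * 2 ^ n := by
  unfold ceilPow
  exact PySem.Int.neg_floordiv_neg_eq_iff_of_pos (by positivity)

-- A's loop as iteration of the ceil-halving step
def fIter : Nat → Int → Int
  | 0, x => x
  | n + 1, x => fIter n (PySem.Int.floordiv (x + 1) 2)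

theorem step_eq_ceilhalf (x : Int) : PySem.Int.floordiv (x + 1) 2 = ceilPow 1 x := by
  have h := (PySem.Int.floordiv_eq_iff_of_pos (a := x + 1) (b := 2)
      (q := PySem.Int.floordiv (x + 1) 2) (by norm_num)).mp rfl
  exact ((ceilPow_eq_iff 1 x (PySem.Int.floordiv (x + 1) 2)).mpr (by push_cast at h ⊢; omega)).symm

theorem ceilPow_ceilPow (n : Nat) (x : Int) : ceilPow n (ceilPow 1 x) = ceilPow (n + 1) x := by
  have hp : (0 : Int) < 2 ^ n := by positivity
  set q := ceilPow 1 x with hq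
  have h1 := (ceilPow_eq_iff 1 x q).mp hq.symm
  have h2 := (ceilPow_eq_iff n q (ceilPow n q)).mp rfl
  refine ((ceilPow_eq_iff (n + 1) x (ceilPow n q)).mpr ?_).symm
  obtain ⟨h1a, h1b⟩ := h1
  obtain ⟨h2a, h2b⟩ := h2
  norm_num at h1a h1b
  have he : (2 : Int) ^ (n + 1) = 2 ^ n * 2 := pow_succ 2 n
  constructor
  · have hA : (ceilPow n q - 1) * 2 ^ n ≤ q - 1 := by omega
    have hB : (ceilPow n q - 1) * 2 ^ n * 2 ≤ (q - 1) * 2 :=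
      mul_le_mul_of_nonneg_right hA (by norm_num)
    calc (ceilPow n q - 1) * 2 ^ (n + 1) = (ceilPow n q - 1) * 2 ^ n * 2 := by rw [he]; ring
      _ ≤ (q - 1) * 2 := hB
      _ < x := by omega
  · have hC : q * 2 ≤ ceilPow n q * 2 ^ n * 2 := mul_le_mul_of_nonneg_right h2b (by norm_num)
    calc x ≤ q * 2 := by omega
      _ ≤ ceilPow n q * 2 ^ n * 2 := hC
      _ = ceilPow n q * 2 ^ (n + 1) := by rw [he]; ring

theorem fIter_eq_ceilPow (n : Nat) (x : Int) : fIter n x = ceilPow n x := by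
  induction n generalizing x with
  | zero =>
    simp [fIter, ceilPow, PySem.Int.floordiv]
  | succ n ih =>
    rw [fIter, ih, step_eq_ceilhalf, ceilPow_ceilPow]

theorem ceilPow_succ_outer (n : Nat) (x : Int) : ceilPow (n + 1) x = ceilPow 1 (ceilPow n x) := by
  have hp : (0 : Int) < 2 ^ n := by positivity
  set q := ceilPow n x with hq
  have h1 := (ceilPow_eq_iff n x q).mp hq.symm
  have h2 := (ceilPow_eq_iff 1 q (ceilPow 1 q)).mp rfl
  refine (ceilPow_eq_iff (n + 1) x (ceilPow 1 q)).mpr ?_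
  obtain ⟨h1a, h1b⟩ := h1
  obtain ⟨h2a, h2b⟩ := h2
  norm_num at h2a h2b
  have he : (2 : Int) ^ (n + 1) = 2 ^ n * 2 := pow_succ 2 n
  constructor
  · have hA : (ceilPow 1 q - 1) * 2 ≤ q - 1 := by omega
    have hB : (ceilPow 1 q - 1) * 2 * 2 ^ n ≤ (q - 1) * 2 ^ n :=
      mul_le_mul_of_nonneg_right hA (le_of_lt hp)
    calc (ceilPow 1 q - 1) * 2 ^ (n + 1) = (ceilPow 1 q - 1) * 2 * 2 ^ n := by rw [he]; ring
      _ ≤ (q - 1) * 2 ^ n := hB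
      _ < x := h1a
  · have hC : q * 2 ^ n ≤ ceilPow 1 q * 2 * 2 ^ n :=
      mul_le_mul_of_nonneg_right (by omega) (le_of_lt hp)
    calc x ≤ q * 2 ^ n := h1b
      _ ≤ ceilPow 1 q * 2 * 2 ^ n := hC
      _ = ceilPow 1 q * 2 ^ (n + 1) := by rw [he]; ring

-- after bitLength-many halvings the value is 0 or 1
theorem ceilPow_B_01 (x : Int) :
    ceilPow (max 1 (PySem.Int.bitLength x)) x = 0 ∨ ceilPow (max 1 (PySem.Int.bitLength x)) x = 1 := by
  set B := max 1 (PySem.Int.bitLength x) with hB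
  have hp : (0 : Int) < 2 ^ B := by positivity
  have hbd : (x.natAbs : Int) < 2 ^ B := by
    calc (x.natAbs : Int) < ((2 ^ PySem.Int.bitLength x : Nat) : Int) := by
          exact_mod_cast PySem.Int.lt_two_pow_bitLength x
      _ ≤ 2 ^ B := by
          have h : PySem.Int.bitLength x ≤ B := le_max_right _ _
          exact_mod_cast Nat.pow_le_pow_right (by norm_num) h
  set v := ceilPow B x with hv
  have h := (ceilPow_eq_iff B x v).mp hv.symm
  have habs : -(2 ^ B) < x ∧ x < 2 ^ B := by
    rcases Int.natAbs_eq x with he | he <;> omega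
  rcases le_or_gt x 0 with hx | hx
  · left
    by_contra hne
    rcases lt_or_gt_of_ne hne with hlt | hgt
    · have : v * 2 ^ B ≤ -1 * 2 ^ B :=
        mul_le_mul_of_nonneg_right (by omega) (le_of_lt hp)
      omega
    · have : 0 * 2 ^ B ≤ (v - 1) * 2 ^ B :=
        mul_le_mul_of_nonneg_right (by omega) (le_of_lt hp)
      omega
  · right
    by_contra hne
    rcases lt_or_gt_of_ne hne with hlt | hgt
    · have : v * 2 ^ B ≤ 0 * 2 ^ B :=
        mul_le_mul_of_nonneg_right (by omega) (le_of_lt hp)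
      omega
    · have : 1 * 2 ^ B ≤ (v - 1) * 2 ^ B :=
        mul_le_mul_of_nonneg_right (by omega) (le_of_lt hp)
      omega

theorem ceilPow_fix (x : Int) (m : Nat) :
    ceilPow (max 1 (PySem.Int.bitLength x) + m) x = ceilPow (max 1 (PySem.Int.bitLength x)) x := by
  induction m with
  | zero => rfl
  | succ m ih =>
    have h1 : ceilPow (max 1 (PySem.Int.bitLength x) + (m + 1)) x
        = ceilPow 1 (ceilPow (max 1 (PySem.Int.bitLength x) + m) x) :=
      ceilPow_succ_outer _ x
    rw [h1, ih]
    rcases ceilPow_B_01 x with h | h <;> rw [h] <;> decide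

-- folding the pair state over any list: the first component iterates the step, length times
theorem foldl_pair_fst (l : List Int) (t : Int) (acc : List Int) :
    ((l.foldl (fun (s : Int × List Int) _ =>
        let u := PySem.Int.floordiv (s.1 + 1) 2
        (u, s.2 ++ [u])) (t, acc)).1) = fIter l.length t := by
  induction l generalizing t acc with
  | nil => rfl
  | cons a l ih => simpa [List.foldl, fIter] using ih _ _

-- ===== VERDICT (by name: the statement is the Claim_ definition above) =====
theorem get_feat_len_spec : Claim_equal_get_feat_len := by
  intro x depth _
  unfold Spec_get_feat_len
  have hA : get_feat_len x depth = fIter (PySem.List.pyRange 0 (depth - 1) 1).length x := by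
    unfold get_feat_len
    simpa using foldl_pair_fst (PySem.List.pyRange 0 (depth - 1) 1) x [x]
  have hlen : (PySem.List.pyRange 0 (depth - 1) 1).length = (depth - 1).toNat := by
    simpa using PySem.List.length_pyRange_one 0 (depth - 1)
  rw [hA, hlen, fIter_eq_ceilPow]
  unfold get_feat_len_alt
  by_cases hk : depth - 1 ≤ 0
  · simp only [hk, if_true]
    have h0 : (depth - 1).toNat = 0 := by omega
    rw [h0, ← fIter_eq_ceilPow]
    rfl
  · simp only [hk, if_false]
    have hC0 : (0 : Int) ≤ max 1 ((PySem.Int.bitLength x : Nat) : Int) := by positivity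
    rcases le_or_gt (depth - 1) (max 1 ((PySem.Int.bitLength x : Nat) : Int)) with hle | hgt
    · rw [min_eq_left hle]
      rfl
    · rw [min_eq_right (le_of_lt hgt)]
      have hCt : (max 1 ((PySem.Int.bitLength x : Nat) : Int)).toNat
          = max 1 (PySem.Int.bitLength x) := by
        omega
      have hsplit : (depth - 1).toNat
          = max 1 (PySem.Int.bitLength x) + ((depth - 1).toNat - max 1 (PySem.Int.bitLength x)) := by
        omega
      show ceilPow (depth - 1).toNat x = ceilPow (max 1 ((PySem.Int.bitLength x : Nat) : Int)).toNat x
      rw [hCt, hsplit, ceilPow_fix]
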